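-- pv_equiv track=rewrite | github.com/JSLEE753/algorithm | 문제/17. 공원 산책 (Lv.1)/main.py | solution
-- ===== SOURCE A (Python) =====
-- def solution(park, routes):
--     # N, E, S, W
--     vector = {'N' : (-1,0), 'E' : (0,1) , 'S' : (1,0), 'W' : (0,-1)}
--     current = []
--     width = len(park[0]) - 1
--     height = len(park) - 1
--
--     for index, row in enumerate(park) :
--         if 'S' in row :
--             current = [index,row.index('S')]
--             break
--
--     for route in routes :
--         v, n = route.split()
--         n = int(n)
--         enabled = True
--         dx,dy = vector[v]
--         nx = current[0] + dx*n
--         ny = current[1] + dy*n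
--         temp_current = current[:]
--         if nx < 0 or nx > height or ny < 0 or ny > width :
--             enabled = False
--         else :
--             for _ in range(n) :
--                 tx = temp_current[0] + dx
--                 ty = temp_current[1] + dy
--                 temp_current = [tx,ty]
--                 if (park[tx][ty] == 'X') :
--                     enabled = False
--                     break
--
--         if enabled :
--             current = [nx,ny]
--     return current
-- ===== SOURCE B (Python) =====
-- def solution(park, routes):
--     # Alternative algorithm: no step-by-step simulation. Each route reduces to a
--     # bounds test on the endpoint plus an 'X' membership test on the slice of the
--     # row (or of the column string built by joining) that the move would traverse.
--     h, w = len(park), len(park[0])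
--     sloc = next(((i, r.index('S')) for i, r in enumerate(park) if 'S' in r), None)
--     if sloc is None:
--         return []
--     x, y = sloc
--     for route in routes:
--         v, ns = route.split()
--         n = int(ns)
--         if v == 'N':
--             nx, ny = x - n, y
--             ok = nx >= 0 and 'X' not in ''.join(r[y] for r in park)[nx:x]
--         elif v == 'S':
--             nx, ny = x + n, y
--             ok = nx < h and 'X' not in ''.join(r[y] for r in park)[x + 1:nx + 1]
--         elif v == 'E':
--             nx, ny = x, y + n
--             ok = ny < w and 'X' not in park[x][y + 1:ny + 1]
--         else:
--             nx, ny = x, y - n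
--             ok = ny >= 0 and 'X' not in park[x][ny:y]
--         if ok:
--             x, y = nx, ny
--     return [x, y]
-- ===== Notes on version B (the rewrite author's own statement) =====
-- stated objective: alternative
-- what changed: A simulates every route cell-by-cell (an inner loop stepping one cell at a time over a copied list state, after a separate endpoint bounds precheck); B does no step simulation at all: each route is decided by one endpoint bounds test plus an 'X' substring-membership test on the slice of the row string (or of the column string obtained by joining one character per row) that the move would traverse.
-- outside the precondition, e.g. on solution(['S..'], ['W -5']): A returns [0, 0], B returns [0, 5]; on solution(['S', '..'], ['S 1']): A returns [1, 0], B returns [1, 0]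
import Mathlib
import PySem

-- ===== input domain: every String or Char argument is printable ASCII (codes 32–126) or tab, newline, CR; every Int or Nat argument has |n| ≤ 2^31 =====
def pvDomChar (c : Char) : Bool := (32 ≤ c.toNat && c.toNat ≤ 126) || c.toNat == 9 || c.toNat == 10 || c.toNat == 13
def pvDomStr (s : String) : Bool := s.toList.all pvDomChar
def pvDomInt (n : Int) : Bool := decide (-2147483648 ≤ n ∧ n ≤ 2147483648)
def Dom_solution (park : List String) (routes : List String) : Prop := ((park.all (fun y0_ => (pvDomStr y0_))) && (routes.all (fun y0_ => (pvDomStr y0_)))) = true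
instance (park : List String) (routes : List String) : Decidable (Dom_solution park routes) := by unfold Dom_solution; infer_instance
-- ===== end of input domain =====

-- B replaces A's cell-by-cell walk simulation by a bounds test plus an 'X'
-- membership test on the traversed slice of the row / joined column string (alternative algorithm, similar cost).


-- ===== PORT A =====
-- park[tx][ty], with none where Python would raise IndexError (excluded by Pre_)
def pvCharAt (park : List String) (x y : Int) : Option Char :=
  (PySem.List.pyGet? park x).bind fun row => PySem.Str.pyGet? row y

-- vector[v]; (0,0) is junk for a KeyError key (excluded by Pre_)
def pvVecA (v : String) : Int × Int :=
  if v = "N" then (-1, 0) else if v = "E" then (0, 1)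
  else if v = "S" then (1, 0) else if v = "W" then (0, -1) else (0, 0)

-- A's first loop: first row containing 'S' gives current = [index, row.index('S')]
def pvFindA : List String → Int → List Int
  | [], _ => []
  | row :: rest, i =>
      if 0 ≤ PySem.Str.find row "S" then [i, PySem.Str.find row "S"]
      else pvFindA rest (i + 1)

-- A's inner 'for _ in range(n)' loop: walks, False as soon as an 'X' is met
def pvWalkA (park : List String) (dx dy : Int) : Nat → Int → Int → Bool
  | 0, _, _ => true
  | k + 1, x, y =>
      if pvCharAt park (x + dx) (y + dy) = some 'X' then false
      else pvWalkA park dx dy k (x + dx) (y + dy)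

-- one iteration of A's 'for route in routes' loop (junk branches = Python raise, outside Pre_)
def pvStepA (park : List String) (height width : Int) (current : List Int) (route : String) : List Int :=
  match PySem.Str.split₀ route with
  | [v, ns] =>
    match PySem.Int.ofStr? ns with
    | some n =>
      let d := pvVecA v
      let cx := (PySem.List.pyGet? current 0).getD 0
      let cy := (PySem.List.pyGet? current 1).getD 0
      let nx := cx + d.1 * n
      let ny := cy + d.2 * n
      if nx < 0 ∨ nx > height ∨ ny < 0 ∨ ny > width then current
      else if pvWalkA park d.1 d.2 n.toNat cx cy then [nx, ny] else current
    | none => current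
  | _ => current

def solution (park : List String) (routes : List String) : List Int :=
  let width : Int := PySem.Str.len (park.headD "") - 1
  let height : Int := (park.length : Int) - 1
  routes.foldl (pvStepA park height width) (pvFindA park 0)

-- ===== PORT B =====
-- next((r, row.index('S')) for r, row in enumerate(park) if 'S' in row), default None
def pvFindB : List String → Int → Option (Int × Int)
  | [], _ => none
  | row :: rest, r =>
      if PySem.Str.isIn "S" row then some (r, PySem.Str.find row "S")
      else pvFindB rest (r + 1)

-- ''.join(r[y] for r in park)  (junk ' ' for a short row = Python IndexError, outside Pre_)
def pvColB (park : List String) (y : Int) : List Char :=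
  park.map (fun r => (PySem.Str.pyGet? r y).getD ' ')

-- park[x]  (junk "" for x out of range = Python IndexError, outside Pre_)
def pvRowB (park : List String) (x : Int) : List Char :=
  ((PySem.List.pyGet? park x).getD "").toList

-- one route of B: endpoint bounds test + 'X'-membership test on the traversed slice
def pvStepB (park : List String) (h w : Int) (pos : Int × Int) (route : String) : Int × Int :=
  match PySem.Str.split₀ route with
  | [v, ns] =>
    match PySem.Int.ofStr? ns with
    | some n =>
      let x := pos.1
      let y := pos.2
      if v = "N" then
        let nx := x - n
        if 0 ≤ nx ∧ PySem.Chars.isIn ['X'] (PySem.List.slice (pvColB park y) (some nx) (some x)) = false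
        then (nx, y) else pos
      else if v = "S" then
        let nx := x + n
        if nx < h ∧ PySem.Chars.isIn ['X'] (PySem.List.slice (pvColB park y) (some (x + 1)) (some (nx + 1))) = false
        then (nx, y) else pos
      else if v = "E" then
        let ny := y + n
        if ny < w ∧ PySem.Chars.isIn ['X'] (PySem.List.slice (pvRowB park x) (some (y + 1)) (some (ny + 1))) = false
        then (x, ny) else pos
      else
        let ny := y - n
        if 0 ≤ ny ∧ PySem.Chars.isIn ['X'] (PySem.List.slice (pvRowB park x) (some ny) (some y)) = false
        then (x, ny) else pos
    | none => pos
  | _ => pos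

def solution_alt (park : List String) (routes : List String) : List Int :=
  let h : Int := (park.length : Int)
  let w : Int := PySem.Str.len (park.headD "")
  match pvFindB park 0 with
  | some s =>
      let e := routes.foldl (pvStepB park h w) s
      [e.1, e.2]
  | none => []   -- Source B returns [] here (no 'S')

-- ===== PRECONDITION & SPEC =====
-- a route is 'v n' with v one of NESW and n a Python int literal with n ≥ 0
def pvRouteOK (route : String) : Bool :=
  match PySem.Str.split₀ route with
  | [v, ns] =>
      (v == "N" || v == "E" || v == "S" || v == "W") &&
      (match PySem.Int.ofStr? ns with
       | some n => decide (0 ≤ n)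
       | none => false)
  | _ => false

-- Pre_ excludes: the empty park (A raises IndexError on park[0]); malformed routes (A raises);
-- negative step counts, which are outside the problem's natural domain (there A and B both
-- teleport via an empty walk/slice but check different bounds); and, when there is at least
-- one route to walk, parks without 'S' (A raises IndexError on current[0]) and non-rectangular
-- parks (walking may raise IndexError and the width taken from row 0 is meaningless).
def Pre_solution (park : List String) (routes : List String) : Prop :=
  park ≠ [] ∧
  (∀ route ∈ routes, pvRouteOK route = true) ∧
  (routes = [] ∨
    ((∀ r ∈ park, PySem.Str.len r = PySem.Str.len (park.headD "")) ∧
     (∃ r ∈ park, PySem.Str.isIn "S" r = true)))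
instance (park : List String) (routes : List String) : Decidable (Pre_solution park routes) := by unfold Pre_solution; infer_instance

def pvWitness_solution : List String × List String := (["S.X", "..X", "..."], ["E 1", "S 2", "W 1", "N 9"])

def Spec_solution (park : List String) (routes : List String) (out : List Int) : Prop := out = solution_alt park routes
instance (park : List String) (routes : List String) (out : List Int) : Decidable (Spec_solution park routes out) := by unfold Spec_solution; infer_instance

-- ===== CLAIM (what is proved, stated in full; the proofs are below) =====
def Claim_equal_solution : Prop := ∀ (park : List String) (routes : List String), Dom_solution park routes → Pre_solution park routes → Spec_solution park routes (solution park routes)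

-- ===== LEMMAS AND PROOFS =====

-- (proof-only) the cell (x, y) is inside the h × w grid
def pvInb (park : List String) (w x y : Int) : Prop :=
  0 ≤ x ∧ x < (park.length : Int) ∧ 0 ≤ y ∧ y < w

theorem pvSingleton_infix {c : Char} {l : List Char} : [c] <:+: l ↔ c ∈ l := by
  constructor
  · intro h; exact h.sublist.subset (by simp)
  · intro h
    obtain ⟨s, t, rfl⟩ := List.append_of_mem h
    exact ⟨s, t, by simp⟩

theorem pvIsInX_false_iff (l : List Char) :
    PySem.Chars.isIn ['X'] l = false ↔ 'X' ∉ l := by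
  rw [PySem.Chars.isIn_eq_false_iff, pvSingleton_infix]

theorem pvMemX_slice_iff (l : List Char) (a b : Int) (ha : 0 ≤ a) (hb : 0 ≤ b) :
    'X' ∈ PySem.List.slice l (some a) (some b) ↔
      ∃ i : Nat, a.toNat ≤ i ∧ i < b.toNat ∧ l[i]? = some 'X' := by
  rw [PySem.List.slice_toNat l ha hb, List.mem_iff_getElem?]
  constructor
  · rintro ⟨j, hj⟩
    rw [List.getElem?_take] at hj
    split at hj
    · rw [List.getElem?_drop] at hj
      exact ⟨a.toNat + j, by omega, by omega, hj⟩
    · simp at hj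
  · rintro ⟨i, h1, h2, h3⟩
    refine ⟨i - a.toNat, ?_⟩
    rw [List.getElem?_take, if_pos (by omega), List.getElem?_drop,
      show a.toNat + (i - a.toNat) = i by omega]
    exact h3

theorem pvColGet (park : List String) (w y i : Int)
    (hrect : ∀ r ∈ park, PySem.Str.len r = w)
    (hi0 : 0 ≤ i) (hih : i < park.length) (hy0 : 0 ≤ y) (hyw : y < w) :
    (pvColB park y)[i.toNat]? = pvCharAt park i y := by
  have hlt : i.toNat < park.length := by omega
  have hmem : park[i.toNat] ∈ park := List.getElem_mem hlt
  have hlen := hrect _ hmem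
  rw [PySem.Str.len_eq] at hlen
  have hy : y.toNat < park[i.toNat].toList.length := by omega
  unfold pvColB pvCharAt
  rw [show i = ((i.toNat : Nat) : Int) by omega, PySem.List.pyGet?_natCast,
    show y = ((y.toNat : Nat) : Int) by omega]
  simp only [Int.toNat_natCast, List.getElem?_map, List.getElem?_eq_getElem hlt,
    Option.map_some, Option.bind_some, PySem.Str.pyGet?_natCast,
    List.getElem?_eq_getElem hy, Option.getD_some]

theorem pvRowGet (park : List String) (x j : Int)
    (hx0 : 0 ≤ x) (hxh : x < park.length) (hj : 0 ≤ j) :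
    (pvRowB park x)[j.toNat]? = pvCharAt park x j := by
  have hlt : x.toNat < park.length := by omega
  unfold pvRowB pvCharAt
  rw [show x = ((x.toNat : Nat) : Int) by omega, PySem.List.pyGet?_natCast,
    show j = ((j.toNat : Nat) : Int) by omega]
  simp only [Int.toNat_natCast, List.getElem?_eq_getElem hlt,
    Option.getD_some, Option.bind_some, PySem.Str.pyGet?_natCast]

-- A's walk succeeds iff none of the visited cells holds 'X'
theorem pvWalkA_iff (park : List String) (dx dy : Int) :
    ∀ (k : Nat) (x y : Int),
    pvWalkA park dx dy k x y = true ↔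
      ∀ j : Nat, 1 ≤ j → j ≤ k → pvCharAt park (x + dx * j) (y + dy * j) ≠ some 'X' := by
  intro k
  induction k with
  | zero => intro x y; simp [pvWalkA]; intro j h1 h2; omega
  | succ k ih =>
      intro x y
      rw [show pvWalkA park dx dy (k + 1) x y
            = if pvCharAt park (x + dx) (y + dy) = some 'X' then false
              else pvWalkA park dx dy k (x + dx) (y + dy) from rfl]
      by_cases hX : pvCharAt park (x + dx) (y + dy) = some 'X'
      · rw [if_pos hX]
        constructor
        · intro h; simp at h
        · intro H
          exfalso
          exact H 1 (by omega) (by omega) (by simpa using hX)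
      · rw [if_neg hX, ih]
        constructor
        · intro H j h1 h2
          obtain ⟨j', rfl⟩ : ∃ j', j = j' + 1 := ⟨j - 1, by omega⟩
          rcases Nat.eq_zero_or_pos j' with hj | hj
          · subst hj; simpa using hX
          · have hth := H j' hj (by omega)
            push_cast
            rw [show x + dx * ((j' : Int) + 1) = x + dx + dx * j' from by ring,
              show y + dy * ((j' : Int) + 1) = y + dy + dy * j' from by ring]
            exact hth
        · intro H j h1 h2
          have hth := H (j + 1) (by omega) (by omega)
          push_cast at hth
          rw [show x + dx * ((j : Int) + 1) = x + dx + dx * j from by ring,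
            show y + dy * ((j : Int) + 1) = y + dy + dy * j from by ring] at hth
          exact hth

-- one route: A's step on [x, y] equals B's step on (x, y), and the result stays in bounds
theorem pvStep_eq (park : List String) (w : Int) (route : String) (x y : Int)
    (hrect : ∀ r ∈ park, PySem.Str.len r = w)
    (hr : pvRouteOK route = true) (hx : pvInb park w x y) :
    pvStepA park ((park.length : Int) - 1) (w - 1) [x, y] route
      = [(pvStepB park (park.length : Int) w (x, y) route).1,
         (pvStepB park (park.length : Int) w (x, y) route).2]
    ∧ pvInb park w (pvStepB park (park.length : Int) w (x, y) route).1
                   (pvStepB park (park.length : Int) w (x, y) route).2 := by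
  obtain ⟨hx0, hxh, hy0, hyw⟩ := hx
  unfold pvRouteOK at hr
  unfold pvStepA pvStepB
  match hsp : PySem.Str.split₀ route with
  | [] => rw [hsp] at hr; simp at hr
  | [v] => rw [hsp] at hr; simp at hr
  | v :: ns :: c :: rest => rw [hsp] at hr; simp at hr
  | [v, ns] =>
    rw [hsp] at hr
    match hofs : PySem.Int.ofStr? ns with
    | none => simp [hofs] at hr
    | some n =>
      simp only [hofs, Bool.and_eq_true, Bool.or_eq_true, beq_iff_eq, decide_eq_true_eq] at hr
      obtain ⟨hv, hn⟩ := hr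
      have hg0 : (PySem.List.pyGet? [x, y] 0).getD 0 = x := rfl
      have hg1 : (PySem.List.pyGet? [x, y] 1).getD 0 = y := rfl
      rcases hv with ((hv | hv) | hv) | hv <;> subst hv <;>
        simp only [pvVecA, hofs, hg0, hg1, reduceIte, String.reduceEq]
      · -- N
        by_cases hb : 0 ≤ x - n
        · rw [if_neg (by omega)]
          have hkey : pvWalkA park (-1) 0 n.toNat x y = true ↔
              PySem.Chars.isIn ['X']
                (PySem.List.slice (pvColB park y) (some (x - n)) (some x)) = false := by
            rw [pvWalkA_iff, pvIsInX_false_iff, pvMemX_slice_iff _ _ _ hb hx0]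
            push Not
            constructor
            · intro H i h1 h2
              rw [show (pvColB park y)[i]? = pvCharAt park (i : Int) y from by
                simpa using pvColGet park w y i hrect (by omega) (by omega) hy0 hyw]
              have hth := H (x.toNat - i) (by omega) (by omega)
              rw [show x + -1 * ((x.toNat - i : Nat) : Int) = (i : Int) from by omega,
                show y + 0 * ((x.toNat - i : Nat) : Int) = y from by ring] at hth
              exact hth
            · intro H j h1 h2
              have hji : (j : Int) ≤ n := by omega
              have hth := H (x - j).toNat (by omega) (by omega)
              rw [show (pvColB park y)[(x - j).toNat]? = pvCharAt park (x - j) y from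
                pvColGet park w y (x - j) hrect (by omega) (by omega) hy0 hyw] at hth
              rw [show x + -1 * (j : Int) = x - j from by omega,
                show y + 0 * (j : Int) = y from by ring]
              exact hth
          by_cases hw : pvWalkA park (-1) 0 n.toNat x y = true
          · rw [if_pos hw, if_pos ⟨hb, hkey.mp hw⟩]
            exact ⟨by rw [show x + -1 * n = x - n from by ring, show y + 0 * n = y from by ring], by omega, by omega, by omega, by omega⟩
          · rw [if_neg hw, if_neg (by rintro ⟨-, hf⟩; exact hw (hkey.mpr hf))]
            exact ⟨rfl, hx0, hxh, hy0, hyw⟩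
        · rw [if_pos (by omega), if_neg (by rintro ⟨h1, -⟩; omega)]
          exact ⟨rfl, hx0, hxh, hy0, hyw⟩
      · -- E
        by_cases hb : y + n < w
        · rw [if_neg (by omega)]
          have hkey : pvWalkA park 0 1 n.toNat x y = true ↔
              PySem.Chars.isIn ['X']
                (PySem.List.slice (pvRowB park x) (some (y + 1)) (some (y + n + 1))) = false := by
            rw [pvWalkA_iff, pvIsInX_false_iff, pvMemX_slice_iff _ _ _ (by omega) (by omega)]
            push Not
            constructor
            · intro H i h1 h2
              rw [show (pvRowB park x)[i]? = pvCharAt park x (i : Int) from by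
                simpa using pvRowGet park x i hx0 hxh (by omega)]
              have hth := H (i - y.toNat) (by omega) (by omega)
              rw [show x + 0 * ((i - y.toNat : Nat) : Int) = x from by ring,
                show y + 1 * ((i - y.toNat : Nat) : Int) = (i : Int) from by omega] at hth
              exact hth
            · intro H j h1 h2
              have hji : (j : Int) ≤ n := by omega
              have hth := H (y + j).toNat (by omega) (by omega)
              rw [show (pvRowB park x)[(y + j).toNat]? = pvCharAt park x (y + j) from
                pvRowGet park x (y + j) hx0 hxh (by omega)] at hth
              rw [show x + 0 * (j : Int) = x from by ring,
                show y + 1 * (j : Int) = y + j from by ring]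
              exact hth
          by_cases hw : pvWalkA park 0 1 n.toNat x y = true
          · rw [if_pos hw, if_pos ⟨hb, hkey.mp hw⟩]
            exact ⟨by rw [show x + 0 * n = x from by ring, show y + 1 * n = y + n from by ring], by omega, by omega, by omega, by omega⟩
          · rw [if_neg hw, if_neg (by rintro ⟨-, hf⟩; exact hw (hkey.mpr hf))]
            exact ⟨rfl, hx0, hxh, hy0, hyw⟩
        · rw [if_pos (by omega), if_neg (by rintro ⟨h1, -⟩; omega)]
          exact ⟨rfl, hx0, hxh, hy0, hyw⟩
      · -- S
        by_cases hb : x + n < (park.length : Int)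
        · rw [if_neg (by omega)]
          have hkey : pvWalkA park 1 0 n.toNat x y = true ↔
              PySem.Chars.isIn ['X']
                (PySem.List.slice (pvColB park y) (some (x + 1)) (some (x + n + 1))) = false := by
            rw [pvWalkA_iff, pvIsInX_false_iff, pvMemX_slice_iff _ _ _ (by omega) (by omega)]
            push Not
            constructor
            · intro H i h1 h2
              rw [show (pvColB park y)[i]? = pvCharAt park (i : Int) y from by
                simpa using pvColGet park w y i hrect (by omega) (by omega) hy0 hyw]
              have hth := H (i - x.toNat) (by omega) (by omega)
              rw [show x + 1 * ((i - x.toNat : Nat) : Int) = (i : Int) from by omega,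
                show y + 0 * ((i - x.toNat : Nat) : Int) = y from by ring] at hth
              exact hth
            · intro H j h1 h2
              have hji : (j : Int) ≤ n := by omega
              have hth := H (x + j).toNat (by omega) (by omega)
              rw [show (pvColB park y)[(x + j).toNat]? = pvCharAt park (x + j) y from
                pvColGet park w y (x + j) hrect (by omega) (by omega) hy0 hyw] at hth
              rw [show x + 1 * (j : Int) = x + j from by ring,
                show y + 0 * (j : Int) = y from by ring]
              exact hth
          by_cases hw : pvWalkA park 1 0 n.toNat x y = true
          · rw [if_pos hw, if_pos ⟨hb, hkey.mp hw⟩]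
            exact ⟨by rw [show x + 1 * n = x + n from by ring, show y + 0 * n = y from by ring], by omega, by omega, by omega, by omega⟩
          · rw [if_neg hw, if_neg (by rintro ⟨-, hf⟩; exact hw (hkey.mpr hf))]
            exact ⟨rfl, hx0, hxh, hy0, hyw⟩
        · rw [if_pos (by omega), if_neg (by rintro ⟨h1, -⟩; omega)]
          exact ⟨rfl, hx0, hxh, hy0, hyw⟩
      · -- W
        by_cases hb : 0 ≤ y - n
        · rw [if_neg (by omega)]
          have hkey : pvWalkA park 0 (-1) n.toNat x y = true ↔
              PySem.Chars.isIn ['X']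
                (PySem.List.slice (pvRowB park x) (some (y - n)) (some y)) = false := by
            rw [pvWalkA_iff, pvIsInX_false_iff, pvMemX_slice_iff _ _ _ hb hy0]
            push Not
            constructor
            · intro H i h1 h2
              rw [show (pvRowB park x)[i]? = pvCharAt park x (i : Int) from by
                simpa using pvRowGet park x i hx0 hxh (by omega)]
              have hth := H (y.toNat - i) (by omega) (by omega)
              rw [show x + 0 * ((y.toNat - i : Nat) : Int) = x from by ring,
                show y + -1 * ((y.toNat - i : Nat) : Int) = (i : Int) from by omega] at hth
              exact hth
            · intro H j h1 h2
              have hji : (j : Int) ≤ n := by omega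
              have hth := H (y - j).toNat (by omega) (by omega)
              rw [show (pvRowB park x)[(y - j).toNat]? = pvCharAt park x (y - j) from
                pvRowGet park x (y - j) hx0 hxh (by omega)] at hth
              rw [show x + 0 * (j : Int) = x from by ring,
                show y + -1 * (j : Int) = y - j from by omega]
              exact hth
          by_cases hw : pvWalkA park 0 (-1) n.toNat x y = true
          · rw [if_pos hw, if_pos ⟨hb, hkey.mp hw⟩]
            exact ⟨by rw [show x + 0 * n = x from by ring, show y + -1 * n = y - n from by ring], by omega, by omega, by omega, by omega⟩
          · rw [if_neg hw, if_neg (by rintro ⟨-, hf⟩; exact hw (hkey.mpr hf))]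
            exact ⟨rfl, hx0, hxh, hy0, hyw⟩
        · rw [if_pos (by omega), if_neg (by rintro ⟨h1, -⟩; omega)]
          exact ⟨rfl, hx0, hxh, hy0, hyw⟩

-- the whole route loop: A's fold on list state equals B's fold on pair state
theorem pvFold_eq (park : List String) (w : Int)
    (hrect : ∀ r ∈ park, PySem.Str.len r = w) :
    ∀ (routes : List String) (x y : Int),
    (∀ r ∈ routes, pvRouteOK r = true) → pvInb park w x y →
    routes.foldl (pvStepA park ((park.length : Int) - 1) (w - 1)) [x, y]
      = [(routes.foldl (pvStepB park (park.length : Int) w) (x, y)).1,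
         (routes.foldl (pvStepB park (park.length : Int) w) (x, y)).2] := by
  intro routes
  induction routes with
  | nil => intro x y _ _; rfl
  | cons r rs ih =>
      intro x y hr hx
      have hs := pvStep_eq park w r x y hrect (hr r (by simp)) hx
      simp only [List.foldl_cons]
      rw [hs.1]
      have := ih (pvStepB park (park.length : Int) w (x, y) r).1
                 (pvStepB park (park.length : Int) w (x, y) r).2
                 (fun t ht => hr t (by simp [ht])) hs.2
      simpa using this

-- the two 'find the S cell' scans agree when B's finds something
theorem pvFind_eq : ∀ (park : List String) (i : Int),
    (match pvFindB park i with
     | some s => pvFindA park i = [s.1, s.2]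
     | none => pvFindA park i = []) := by
  intro park
  induction park with
  | nil => intro i; simp [pvFindB, pvFindA]
  | cons row rest ih =>
      intro i
      by_cases h : PySem.Chars.isIn ['S'] row.toList = true
      · have h0 : 0 ≤ PySem.Chars.find row.toList ['S'] :=
          (PySem.Chars.find_nonneg_iff _ _).mpr ((PySem.Chars.isIn_iff_infix _ _).mp h)
        simp [pvFindA, pvFindB, h, h0]
      · have h0 : ¬ (0 ≤ PySem.Chars.find row.toList ['S']) := by
          rw [PySem.Chars.find_nonneg_iff]
          rw [PySem.Chars.isIn_iff_infix] at h
          exact h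
        simp only [pvFindA, pvFindB, PySem.Str.isIn_eq, PySem.Str.find_eq,
          show ("S" : String).toList = ['S'] from rfl, h, h0, if_false, Bool.false_eq_true]
        exact ih (i + 1)

-- B's scan finds an in-bounds cell when some row contains 'S' (rectangular park)
theorem pvFindB_some (w : Int) : ∀ (park : List String) (i : Int),
    (∀ r ∈ park, PySem.Str.len r = w) →
    (∃ r ∈ park, PySem.Str.isIn "S" r = true) →
    0 ≤ i →
    ∃ a b, pvFindB park i = some (a, b) ∧ 0 ≤ a ∧ a < i + park.length ∧ 0 ≤ b ∧ b < w := by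
  intro park
  induction park with
  | nil => intro i _ hS _; simp at hS
  | cons row rest ih =>
      intro i hlen hS hi
      by_cases h : PySem.Chars.isIn ['S'] row.toList = true
      · have h0 : 0 ≤ PySem.Chars.find row.toList ['S'] :=
          (PySem.Chars.find_nonneg_iff _ _).mpr ((PySem.Chars.isIn_iff_infix _ _).mp h)
        have hlt : (PySem.Chars.find row.toList ['S']).toNat < row.toList.length := by
          have hle := (PySem.Chars.find_spec h0).1.length_le
          rw [List.length_drop] at hle
          simp only [List.length_cons, List.length_nil] at hle
          omega
        have hwrow : (row.toList.length : Int) = w := by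
          have := hlen row (by simp)
          rwa [PySem.Str.len_eq] at this
        refine ⟨i, PySem.Str.find row "S", ?_, hi, ?_, ?_, ?_⟩
        · simp [pvFindB, PySem.Str.find_eq, h]
        · simp only [List.length_cons]
          push_cast
          omega
        · rw [PySem.Str.find_eq]
          exact h0
        · rw [PySem.Str.find_eq]
          simp only [show ("S" : String).toList = ['S'] from rfl]
          omega
      · obtain ⟨r, hmem, hrS⟩ := hS
        rw [PySem.Str.isIn_eq] at hrS
        simp only [show ("S" : String).toList = ['S'] from rfl] at hrS
        rcases List.mem_cons.mp hmem with hmr | hmr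
        · subst hmr
          exact absurd hrS h
        · obtain ⟨a, b, h1, h2, h3, h4, h5⟩ :=
            ih (i + 1) (fun t ht => hlen t (by simp [ht]))
              ⟨r, hmr, by rw [PySem.Str.isIn_eq]; exact hrS⟩ (by omega)
          refine ⟨a, b, ?_, h2, ?_, h4, h5⟩
          · simpa [pvFindB, h] using h1
          · simp only [List.length_cons]
            push_cast at h3 ⊢
            omega

-- ===== VERDICT (by name: the statement is the Claim_ definition above) =====
theorem solution_spec : Claim_equal_solution := by
  unfold Claim_equal_solution
  intro park routes _ hpre
  obtain ⟨hne, hroutes, hrest⟩ := hpre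
  unfold Spec_solution solution solution_alt
  rcases hrest with hnil | ⟨hrect, hS⟩
  · subst hnil
    simp only [List.foldl_nil]
    have hf := pvFind_eq park 0
    cases hfb : pvFindB park 0 with
    | none =>
        rw [hfb] at hf
        simpa using hf
    | some s =>
        rw [hfb] at hf
        simpa using hf
  · obtain ⟨a, b, hfb, ha0, ha1, hb0, hb1⟩ :=
      pvFindB_some (PySem.Str.len (park.headD "")) park 0 hrect hS (le_refl 0)
    have hfa := pvFind_eq park 0
    rw [hfb] at hfa
    simp only [] at hfa
    simp only [hfb, hfa]
    exact pvFold_eq park (PySem.Str.len (park.headD "")) hrect routes a b hroutes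
      ⟨ha0, by simpa using ha1, hb0, hb1⟩
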